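-- pv_equiv track=rewrite | github.com/myudak/belajarUndip | DasarProgrammin/TugasPak/tugas_bu_day8.py | SetMhsTidakMengerjakanKuisKelas
-- ===== SOURCE A (Python) =====
-- def IsEmpty(L):
--     """IsEmpty(L) benar jika list kosong"""
--     return L == [] or L == [[]] or L == ""
--
-- def Konso(e, L):
--     """Konso(e, L) menghasilkan sebuah List dari e dan L dengan e sebagai elemen pertama"""
--     return [e] + L
--
-- def FirstElmt(L):
--     """FirstElmt(L) mengembalikan elemen pertama dari list L"""
--     return L[0]
--
-- def Tail(L):
--     """Tail(L): Menghasilkan list tanpa elemen pertama list L, mungkin kosong"""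
--     return L[1:]
--
-- def SelectKelasMhs(Mhs):
--     return Mhs[2]
--
-- def SelectNilaiMhs(Mhs):
--     return Mhs[3]
--
-- def SetMhsTidakMengerjakanKuisKelas(kelas, SetMhs):
--     """{SetMhsTidakMengerjakanKuis(kelas, Mhs) mengembalikan himpunan mahasiswa yang tidak mengerjakan kuis sama sekali di suatu kelas tertentu sesuai dengan nama kelas di-input-kan sebagai parameter"""
--     if IsEmpty(SetMhs):
--         return []
--     if kelas == SelectKelasMhs(FirstElmt(SetMhs)) and IsEmpty(
--         SelectNilaiMhs(FirstElmt(SetMhs))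
--     ):
--         return Konso(
--             FirstElmt(SetMhs), SetMhsTidakMengerjakanKuisKelas(kelas, Tail(SetMhs))
--         )
--     return SetMhsTidakMengerjakanKuisKelas(kelas, Tail(SetMhs))
-- ===== SOURCE B (Python) =====
-- def IsEmpty(L):
--     return L == [] or L == [[]] or L == ""
--
-- def SelectKelasMhs(Mhs):
--     return Mhs[2]
--
-- def SelectNilaiMhs(Mhs):
--     return Mhs[3]
--
-- def SetMhsTidakMengerjakanKuisKelas(kelas, SetMhs):
--     if IsEmpty(SetMhs):
--         return []
--     return [m for m in SetMhs
--             if kelas == SelectKelasMhs(m) and IsEmpty(SelectNilaiMhs(m))]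
-- ===== Notes on version B (the rewrite author's own statement) =====
-- stated objective: idiomatic
-- what changed: Replaces A's FirstElmt/Tail/Konso element-by-element recursion (with O(n) slicing per step) with the IsEmpty guard followed by a single list-comprehension filter.
import Mathlib
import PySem

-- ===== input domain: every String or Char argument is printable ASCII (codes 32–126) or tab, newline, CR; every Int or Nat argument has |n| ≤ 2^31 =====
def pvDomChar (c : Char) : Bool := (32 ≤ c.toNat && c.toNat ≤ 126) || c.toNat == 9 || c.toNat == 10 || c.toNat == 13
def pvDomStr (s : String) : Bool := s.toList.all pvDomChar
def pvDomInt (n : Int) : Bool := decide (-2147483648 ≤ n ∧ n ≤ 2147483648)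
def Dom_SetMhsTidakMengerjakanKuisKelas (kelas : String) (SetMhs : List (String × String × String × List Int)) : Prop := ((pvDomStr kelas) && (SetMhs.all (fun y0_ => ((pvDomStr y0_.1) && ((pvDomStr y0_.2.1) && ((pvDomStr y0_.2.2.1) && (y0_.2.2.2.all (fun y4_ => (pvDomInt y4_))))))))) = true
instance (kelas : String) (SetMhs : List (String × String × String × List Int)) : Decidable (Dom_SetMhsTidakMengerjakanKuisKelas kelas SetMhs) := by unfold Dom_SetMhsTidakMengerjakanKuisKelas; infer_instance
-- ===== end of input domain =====

-- B replaces A's FirstElmt/Tail/Konso recursion with an IsEmpty guard plus one list-comprehension filter.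
-- ===== PORT A =====
-- IsEmpty(L): L == [] or L == [[]] or L == ""; on the typed inputs here (a list of
-- 4-tuples / a list of ints) only the L == [] case can hold, so it ports to L = [].
def SetMhsTidakMengerjakanKuisKelas (kelas : String) (SetMhs : List (String × String × String × List Int)) : List (String × String × String × List Int) :=
  match SetMhs with
  | [] => []  -- IsEmpty(SetMhs)
  | first :: tail =>
    if kelas == first.2.2.1 && first.2.2.2 == [] then
      first :: SetMhsTidakMengerjakanKuisKelas kelas tail  -- Konso(FirstElmt, rec(Tail))
    else
      SetMhsTidakMengerjakanKuisKelas kelas tail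

-- ===== PORT B =====
def SetMhsTidakMengerjakanKuisKelas_alt (kelas : String) (SetMhs : List (String × String × String × List Int)) : List (String × String × String × List Int) :=
  if SetMhs == [] then []  -- the IsEmpty guard
  else SetMhs.filter (fun m => kelas == m.2.2.1 && m.2.2.2 == [])  -- the comprehension

-- ===== PRECONDITION & SPEC =====
def Spec_SetMhsTidakMengerjakanKuisKelas (kelas : String) (SetMhs : List (String × String × String × List Int)) (out : List (String × String × String × List Int)) : Prop := out = SetMhsTidakMengerjakanKuisKelas_alt kelas SetMhs
instance (kelas : String) (SetMhs : List (String × String × String × List Int)) (out : List (String × String × String × List Int)) : Decidable (Spec_SetMhsTidakMengerjakanKuisKelas kelas SetMhs out) := by unfold Spec_SetMhsTidakMengerjakanKuisKelas; infer_instance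

-- ===== CLAIM (what is proved, stated in full; the proofs are below) =====
def Claim_equal_SetMhsTidakMengerjakanKuisKelas : Prop := ∀ (kelas : String) (SetMhs : List (String × String × String × List Int)), Dom_SetMhsTidakMengerjakanKuisKelas kelas SetMhs → Spec_SetMhsTidakMengerjakanKuisKelas kelas SetMhs (SetMhsTidakMengerjakanKuisKelas kelas SetMhs)

-- ===== LEMMAS AND PROOFS =====
lemma a_eq_filter (kelas : String) (l : List (String × String × String × List Int)) :
    SetMhsTidakMengerjakanKuisKelas kelas l
      = l.filter (fun m => kelas == m.2.2.1 && m.2.2.2 == []) := by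
  induction l with
  | nil => rfl
  | cons x xs ih =>
    rw [SetMhsTidakMengerjakanKuisKelas, List.filter_cons]
    by_cases h : (kelas == x.2.2.1 && x.2.2.2 == []) = true
    · rw [if_pos h, if_pos h, ih]
    · rw [if_neg h, if_neg h, ih]

-- ===== VERDICT (by name: the statement is the Claim_ definition above) =====
theorem SetMhsTidakMengerjakanKuisKelas_spec : Claim_equal_SetMhsTidakMengerjakanKuisKelas := by
  intro kelas SetMhs _
  unfold Spec_SetMhsTidakMengerjakanKuisKelas SetMhsTidakMengerjakanKuisKelas_alt
  cases SetMhs with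
  | nil => rfl
  | cons x xs => simpa using a_eq_filter kelas (x :: xs)
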